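-- pv_equiv track=rewrite | github.com/grapheneaffiliate/h4-polytopic-attention | agent_zero/arc_custom_solvers_b.py | solve_1f85a75f
-- ===== SOURCE A (Python) =====
-- from collections import Counter, defaultdict
--
-- def solve_1f85a75f(grid):
--     """Find the small cluster of a unique color in a noisy grid, extract its pattern."""
--     rows = len(grid)
--     cols = len(grid[0])
--
--     color_count = Counter()
--     for r in range(rows):
--         for c in range(cols):
--             if grid[r][c] != 0:
--                 color_count[grid[r][c]] += 1
--
--     sorted_colors = color_count.most_common()
--
--     for color, count in reversed(sorted_colors):
--         positions = [
--             (r, c) for r in range(rows) for c in range(cols) if grid[r][c] == color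
--         ]
--         if not positions:
--             continue
--
--         min_r = min(r for r, c in positions)
--         max_r = max(r for r, c in positions)
--         min_c = min(c for r, c in positions)
--         max_c = max(c for r, c in positions)
--         h = max_r - min_r + 1
--         w = max_c - min_c + 1
--
--         if h <= 10 and w <= 10:
--             result = []
--             for r in range(min_r, max_r + 1):
--                 row = []
--                 for c in range(min_c, max_c + 1):
--                     row.append(color if grid[r][c] == color else 0)
--                 result.append(row)
--             return result
--
--     return [[0]]
-- ===== SOURCE B (Python) =====
-- def solve_1f85a75f(grid):
--     """Find the small cluster of a unique color in a noisy grid, extract its pattern."""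
--     rows = len(grid)
--     cols = len(grid[0])
--
--     # Single pass: collect every color's positions once, instead of rescanning
--     # the whole grid for each candidate color.
--     pos = {}
--     for r in range(rows):
--         for c in range(cols):
--             v = grid[r][c]
--             if v != 0:
--                 pos.setdefault(v, []).append((r, c))
--
--     for color, ps in reversed(sorted(pos.items(), key=lambda kv: len(kv[1]), reverse=True)):
--         min_r = min(r for r, _ in ps)
--         max_r = max(r for r, _ in ps)
--         min_c = min(c for _, c in ps)
--         max_c = max(c for _, c in ps)
--         if max_r - min_r < 10 and max_c - min_c < 10:
--             return [
--                 [color if grid[r][c] == color else 0 for c in range(min_c, max_c + 1)]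
--                 for r in range(min_r, max_r + 1)
--             ]
--
--     return [[0]]
-- ===== Notes on version B (the rewrite author's own statement) =====
-- stated objective: faster
-- what changed: Instead of counting colors and then rescanning the whole grid once per candidate color (and again for the bounding box), B collects every color's position list in one pass over the grid and reads counts and bounding boxes off those lists.
import Mathlib
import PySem

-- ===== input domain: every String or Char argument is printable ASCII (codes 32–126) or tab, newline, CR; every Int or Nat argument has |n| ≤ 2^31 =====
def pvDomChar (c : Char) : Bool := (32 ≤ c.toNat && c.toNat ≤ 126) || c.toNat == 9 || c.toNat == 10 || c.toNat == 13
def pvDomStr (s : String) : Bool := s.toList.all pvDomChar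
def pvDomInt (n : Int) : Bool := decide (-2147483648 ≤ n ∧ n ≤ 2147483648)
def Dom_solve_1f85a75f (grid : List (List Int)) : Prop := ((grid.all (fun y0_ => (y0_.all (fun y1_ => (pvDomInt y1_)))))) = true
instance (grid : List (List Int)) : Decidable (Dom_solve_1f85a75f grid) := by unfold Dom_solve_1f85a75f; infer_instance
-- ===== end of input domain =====

-- B replaces A's per-color full-grid rescans with one pass that collects every
-- color's position list, then reads counts and bounding boxes off those lists
-- (objective: faster, asymptotically).

-- ===== PORT A =====
-- the for-loop over reversed(sorted_colors) with early 'return', as structural recursion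
-- (Python's min/max on a generator, always reached nonempty here, is ported as minD/maxD with default 0)
def solveALoop (grid : List (List Int)) (rows cols : Int) : List (Int × Int) → List (List Int)
  | [] => [[0]]
  | (color, _count) :: rest =>
    let positions : List (Int × Int) :=
      (PySem.List.pyRange 0 rows 1).foldl (fun acc r =>
        (PySem.List.pyRange 0 cols 1).foldl (fun acc c =>
          if PySem.List.pyGetD (PySem.List.pyGetD grid r []) c 0 = color then acc ++ [(r, c)]
          else acc) acc) []
    if positions = [] then solveALoop grid rows cols rest
    else
      let min_r := PySem.List.minD (positions.map (·.1)) (fun x => x) 0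
      let max_r := PySem.List.maxD (positions.map (·.1)) (fun x => x) 0
      let min_c := PySem.List.minD (positions.map (·.2)) (fun x => x) 0
      let max_c := PySem.List.maxD (positions.map (·.2)) (fun x => x) 0
      let h := max_r - min_r + 1
      let w := max_c - min_c + 1
      if h ≤ 10 ∧ w ≤ 10 then
        (PySem.List.pyRange min_r (max_r + 1) 1).foldl (fun result r =>
          result ++ [(PySem.List.pyRange min_c (max_c + 1) 1).foldl (fun row c =>
            row ++ [if PySem.List.pyGetD (PySem.List.pyGetD grid r []) c 0 = color then color
                    else 0]) []]) []
      else solveALoop grid rows cols rest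

def solve_1f85a75f (grid : List (List Int)) : List (List Int) :=
  let rows : Int := PySem.List.len grid
  let cols : Int := PySem.List.len (PySem.List.pyGetD grid 0 [])
  let color_count : PySem.Dict Int Int :=
    (PySem.List.pyRange 0 rows 1).foldl (fun d r =>
      (PySem.List.pyRange 0 cols 1).foldl (fun d c =>
        let v := PySem.List.pyGetD (PySem.List.pyGetD grid r []) c 0
        if v ≠ 0 then d.modify v 0 (· + 1) else d) d) PySem.Dict.empty
  let sorted_colors := PySem.List.sorted color_count.items (fun p => p.2) true
  solveALoop grid rows cols sorted_colors.reverse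

-- ===== PORT B =====
-- single pass: pos.setdefault(v, []).append((r, c))  =  modify v [] (· ++ [(r, c)])
def solveBCollect (grid : List (List Int)) (rows cols : Int) : PySem.Dict Int (List (Int × Int)) :=
  (PySem.List.pyRange 0 rows 1).foldl (fun d r =>
    (PySem.List.pyRange 0 cols 1).foldl (fun d c =>
      if PySem.List.pyGetD (PySem.List.pyGetD grid r []) c 0 ≠ 0 then
        d.modify (PySem.List.pyGetD (PySem.List.pyGetD grid r []) c 0) [] (· ++ [(r, c)])
      else d) d) PySem.Dict.empty

def solveBLoop (grid : List (List Int)) : List (Int × List (Int × Int)) → List (List Int)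
  | [] => [[0]]
  | (color, ps) :: rest =>
    let min_r := PySem.List.minD (ps.map (·.1)) (fun x => x) 0
    let max_r := PySem.List.maxD (ps.map (·.1)) (fun x => x) 0
    let min_c := PySem.List.minD (ps.map (·.2)) (fun x => x) 0
    let max_c := PySem.List.maxD (ps.map (·.2)) (fun x => x) 0
    if max_r - min_r < 10 ∧ max_c - min_c < 10 then
      (PySem.List.pyRange min_r (max_r + 1) 1).map (fun r =>
        (PySem.List.pyRange min_c (max_c + 1) 1).map (fun c =>
          if PySem.List.pyGetD (PySem.List.pyGetD grid r []) c 0 = color then color else 0))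
    else solveBLoop grid rest

def solve_1f85a75f_alt (grid : List (List Int)) : List (List Int) :=
  let rows : Int := PySem.List.len grid
  let cols : Int := PySem.List.len (PySem.List.pyGetD grid 0 [])
  solveBLoop grid
    ((PySem.List.sorted (solveBCollect grid rows cols).items
        (fun kv => PySem.List.len kv.2) true).reverse)

-- ===== PRECONDITION & SPEC =====
-- Exactly the inputs on which A returns: A (and B) raise IndexError on the empty
-- grid and on grids with a row shorter than the first row (both read grid[0] and
-- every grid[r][c] for c < len(grid[0])).
def Pre_solve_1f85a75f (grid : List (List Int)) : Prop :=
  grid ≠ [] ∧ ∀ row ∈ grid, (grid.headD []).length ≤ row.length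
instance (grid : List (List Int)) : Decidable (Pre_solve_1f85a75f grid) := by
  unfold Pre_solve_1f85a75f; infer_instance

def pvWitness_solve_1f85a75f : List (List Int) := [[0, 3], [3, 0]]

def Spec_solve_1f85a75f (grid : List (List Int)) (out : List (List Int)) : Prop := out = solve_1f85a75f_alt grid
instance (grid : List (List Int)) (out : List (List Int)) : Decidable (Spec_solve_1f85a75f grid out) := by unfold Spec_solve_1f85a75f; infer_instance

-- ===== CLAIM (what is proved, stated in full; the proofs are below) =====
def Claim_equal_solve_1f85a75f : Prop := ∀ (grid : List (List Int)), Dom_solve_1f85a75f grid → Pre_solve_1f85a75f grid → Spec_solve_1f85a75f grid (solve_1f85a75f grid)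

-- ===== LEMMAS AND PROOFS =====

-- the scanned cells (first len(grid[0]) of each row) as (value, (row, col)) in row-major order
def pvCells (grid : List (List Int)) : List (Int × Int × Int) :=
  grid.zipIdx.flatMap (fun p =>
    (p.1.take (grid.headD []).length).zipIdx.map (fun q => (q.1, ((p.2 : Int), (q.2 : Int)))))

def pvNz (grid : List (List Int)) : List (Int × Int × Int) :=
  (pvCells grid).filter (fun t => t.1 ≠ 0)

def pvVals (grid : List (List Int)) : List Int := (pvNz grid).map (·.1)

def pvPos (grid : List (List Int)) (k : Int) : List (Int × Int) :=
  ((pvNz grid).filter (fun t => t.1 == k)).map (·.2)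

-- a fold over range(n), n ≤ len(xs), reading xs[j] is a fold over (xs.take n).zipIdx
theorem pv_foldl_range_take {α β : Type} (xs : List α) (n : Nat) (hn : n ≤ xs.length)
    (d : α) (f : β → α → Int → β) (init : β) :
    (PySem.List.pyRange 0 (n : Int) 1).foldl
        (fun acc j => f acc (PySem.List.pyGetD xs j d) j) init
      = (xs.take n).zipIdx.foldl (fun acc q => f acc q.1 (q.2 : Int)) init := by
  rw [PySem.List.pyRange_zero_nat, List.foldl_map]
  simp only [PySem.List.pyGetD_natCast]
  induction n generalizing init with
  | zero => simp
  | succ n ih =>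
    have hn' : n < xs.length := hn
    rw [List.range_succ, List.foldl_append, ih (Nat.le_of_lt hn'),
        List.take_add_one, List.getElem?_eq_getElem hn']
    simp only [Option.toList_some, List.zipIdx_append, List.foldl_append]
    simp [List.getD, List.getElem?_eq_getElem hn', Nat.min_eq_left (Nat.le_of_lt hn')]

-- a fold over range(len(xs)) reading xs[j] is a fold over xs.zipIdx
theorem pv_foldl_range_getD {α β : Type} (xs : List α) (d : α) (f : β → α → Int → β) (init : β) :
    (PySem.List.pyRange 0 (PySem.List.len xs) 1).foldl
        (fun acc j => f acc (PySem.List.pyGetD xs j d) j) init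
      = xs.zipIdx.foldl (fun acc q => f acc q.1 (q.2 : Int)) init := by

  rw [PySem.List.len_eq, PySem.List.pyRange_zero_nat, List.foldl_map]
  simp only [PySem.List.pyGetD_natCast]
  induction xs using List.reverseRecOn generalizing init with
  | nil => simp
  | append_singleton ys y ih =>
    rw [List.length_append, List.length_singleton, List.range_succ, List.foldl_append,
        List.zipIdx_append, List.foldl_append]
    have h1 : List.foldl (fun x j => f x ((ys ++ [y]).getD j d) ↑j) init (List.range ys.length)
        = List.foldl (fun x j => f x (ys.getD j d) ↑j) init (List.range ys.length) :=
      PySem.List.foldl_congr_mem' _ _ _ _ (by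
        intro j hj acc
        rw [List.mem_range] at hj
        rw [List.getD_append _ _ _ _ hj])
    rw [h1, ih]
    simp [List.getD]

-- nested range folds over a rectangular grid are a fold over pvCells
theorem pv_nested_fold {β : Type} (grid : List (List Int)) (cols : Int)
    (hPre : Pre_solve_1f85a75f grid)
    (hcols : cols = PySem.List.len (PySem.List.pyGetD grid 0 []))
    (f : β → Int → Int → Int → β) (init : β) :
    (PySem.List.pyRange 0 (PySem.List.len grid) 1).foldl (fun acc r =>
        (PySem.List.pyRange 0 cols 1).foldl (fun acc c =>
          f acc (PySem.List.pyGetD (PySem.List.pyGetD grid r []) c 0) r c) acc) init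
      = (pvCells grid).foldl (fun acc t => f acc t.1 t.2.1 t.2.2) init := by
  obtain ⟨hne, hrect⟩ := hPre
  have hcols' : cols = ((grid.headD []).length : Int) := by
    rw [hcols, PySem.List.len_eq, PySem.List.pyGetD_zero]
    cases grid with
    | nil => exact absurd rfl hne
    | cons a l => simp [List.getD]
  rw [pv_foldl_range_getD grid [] (fun acc row r =>
        (PySem.List.pyRange 0 cols 1).foldl (fun acc c =>
          f acc (PySem.List.pyGetD row c 0) r c) acc) init]
  rw [pvCells, List.foldl_flatMap]
  apply PySem.List.foldl_congr_mem'
  intro q hq acc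
  have hmem : q.1 ∈ grid := by
    have := List.mem_zipIdx hq
    exact this.2.2 ▸ List.getElem_mem _
  rw [hcols', pv_foldl_range_take q.1 (grid.headD []).length (hrect q.1 hmem) 0
        (fun acc v c => f acc v q.2 c) acc, List.foldl_map]

theorem pv_count_eq (grid : List (List Int)) (hPre : Pre_solve_1f85a75f grid) :
    ((PySem.List.pyRange 0 (PySem.List.len grid) 1).foldl (fun d r =>
        (PySem.List.pyRange 0 (PySem.List.len (PySem.List.pyGetD grid 0 [])) 1).foldl (fun d c =>
          if PySem.List.pyGetD (PySem.List.pyGetD grid r []) c 0 ≠ 0 then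
            d.modify (PySem.List.pyGetD (PySem.List.pyGetD grid r []) c 0) 0 (· + 1)
          else d) d) PySem.Dict.empty)
      = PySem.Dict.counter (pvVals grid) := by
  have h1 := pv_nested_fold grid _ hPre rfl
        (fun (d : PySem.Dict Int Int) v (_ _ : Int) => if v ≠ 0 then d.modify v 0 (· + 1) else d)
        PySem.Dict.empty
  rw [h1]
  have h2 := PySem.List.foldl_ite_eq_foldl_filter (fun t : Int × Int × Int => t.1 ≠ 0)
        (fun (d : PySem.Dict Int Int) (t : Int × Int × Int) => d.modify t.1 0 (· + 1))
        (pvCells grid) PySem.Dict.empty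
  rw [h2]
  rw [← List.foldl_map (f := fun t : Int × Int × Int => t.1)
        (g := fun d x => PySem.Dict.modify d x 0 (· + 1))]
  rw [PySem.Dict.counter_eq_foldl, pvVals, pvNz]

theorem pv_collect_getD (grid : List (List Int)) (hPre : Pre_solve_1f85a75f grid) (k : Int) :
    (solveBCollect grid (PySem.List.len grid)
        (PySem.List.len (PySem.List.pyGetD grid 0 []))).getD k [] = pvPos grid k := by
  rw [solveBCollect]
  have h1 := pv_nested_fold grid _ hPre rfl
      (fun (d : PySem.Dict Int (List (Int × Int))) v (r c : Int) =>
        if v ≠ 0 then d.modify v [] (· ++ [(r, c)]) else d) PySem.Dict.empty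
  rw [h1]
  have h2 := PySem.List.foldl_ite_eq_foldl_filter (fun t : Int × Int × Int => t.1 ≠ 0)
        (fun (d : PySem.Dict Int (List (Int × Int))) (t : Int × Int × Int) =>
          d.modify t.1 [] (· ++ [t.2])) (pvCells grid) PySem.Dict.empty
  rw [h2, ← pvNz, PySem.Dict.getD_foldl_modify_append, pvPos]
  simp [PySem.Dict.getD_empty]

theorem pv_collect_keys (grid : List (List Int)) (hPre : Pre_solve_1f85a75f grid) :
    (solveBCollect grid (PySem.List.len grid)
        (PySem.List.len (PySem.List.pyGetD grid 0 []))).keys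
      = PySem.Set.ofList (pvVals grid) := by
  rw [solveBCollect]
  have h1 := pv_nested_fold grid _ hPre rfl
      (fun (d : PySem.Dict Int (List (Int × Int))) v (r c : Int) =>
        if v ≠ 0 then d.modify v [] (· ++ [(r, c)]) else d) PySem.Dict.empty
  rw [h1]
  have h2 := PySem.List.foldl_ite_eq_foldl_filter (fun t : Int × Int × Int => t.1 ≠ 0)
        (fun (d : PySem.Dict Int (List (Int × Int))) (t : Int × Int × Int) =>
          d.modify t.1 [] (· ++ [t.2])) (pvCells grid) PySem.Dict.empty
  rw [h2, ← pvNz]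
  have h3 := PySem.Dict.keys_foldl_modify_key (pvNz grid) (fun t : Int × Int × Int => t.1)
        ([] : List (Int × Int))
        (fun (_ : PySem.Dict Int (List (Int × Int))) (t : Int × Int × Int)
          (l : List (Int × Int)) => l ++ [t.2]) PySem.Dict.empty
  rw [h3, PySem.Dict.keys_empty, PySem.Set.update_nil_left, pvVals]

theorem pv_pos_length (grid : List (List Int)) (k : Int) :
    (pvPos grid k).length = (pvVals grid).count k := by

  rw [pvPos, pvVals, List.length_map, List.count_eq_countP, List.countP_map,
      List.countP_eq_length_filter]
  rfl

theorem pv_insertBy_map {α β : Type} (f : α → β) (p : β → β → Bool) (q : α → α → Bool)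
    (hpq : ∀ a b, p (f a) (f b) = q a b) (x : α) (l : List α) :
    PySem.List.insertBy p (f x) (l.map f) = (PySem.List.insertBy q x l).map f := by

  induction l with
  | nil => simp [PySem.List.insertBy]
  | cons y ys ih =>
    simp only [List.map_cons, PySem.List.insertBy, hpq x y, ih]
    split <;> simp

theorem pv_sorted_map {α β κ : Type} [LT κ] [DecidableLT κ] (f : α → β) (key : β → κ)
    (key' : α → κ) (hk : ∀ a, key (f a) = key' a) (l : List α) :
    PySem.List.sorted (l.map f) key true = (PySem.List.sorted l key' true).map f := by

  rw [PySem.List.sorted_rev_eq_foldl_insertBy, PySem.List.sorted_rev_eq_foldl_insertBy]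
  have main : ∀ (acc : List α),
      (l.map f).foldl (fun acc x => PySem.List.insertBy (fun a b => decide (key b < key a)) x acc)
          (acc.map f)
        = (l.foldl (fun acc x => PySem.List.insertBy (fun a b => decide (key' b < key' a)) x acc)
            acc).map f := by
    induction l with
    | nil => intro acc; simp
    | cons y ys ih =>
      intro acc
      have := pv_insertBy_map f (fun a b => decide (key b < key a))
        (fun a b => decide (key' b < key' a)) (by intro a b; simp only []; rw [hk a, hk b]) y acc
      simpa [this] using ih (PySem.List.insertBy (fun a b => decide (key' b < key' a)) y acc)
  simpa using main []

-- positions recomputed by A's comprehension for a color k ≠ 0 equal pvPos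
theorem pv_positions_eq (grid : List (List Int)) (hPre : Pre_solve_1f85a75f grid)
    (k : Int) (hk : k ≠ 0) :
    ((PySem.List.pyRange 0 (PySem.List.len grid) 1).foldl (fun acc r =>
        (PySem.List.pyRange 0 (PySem.List.len (PySem.List.pyGetD grid 0 [])) 1).foldl (fun acc c =>
          if PySem.List.pyGetD (PySem.List.pyGetD grid r []) c 0 = k then acc ++ [(r, c)]
          else acc) acc) [])
      = pvPos grid k := by

  have h1 := pv_nested_fold grid _ hPre rfl
      (fun (acc : List (Int × Int)) v (r c : Int) =>
        if v = k then acc ++ [(r, c)] else acc) []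
  rw [h1]
  have h2 := PySem.List.foldl_append_ite (fun t : Int × Int × Int => t.1 = k)
      (fun t : Int × Int × Int => t.2) (pvCells grid) []
  rw [h2, pvPos, pvNz, List.filter_filter]
  simp only [List.nil_append]
  congr 1
  apply List.filter_congr
  intro t _
  by_cases h : t.1 = k
  · simp [h, hk]
  · simp [h]

theorem pv_loop_eq (grid : List (List Int)) (hPre : Pre_solve_1f85a75f grid)
    (ks : List Int) (hks : ∀ k ∈ ks, k ∈ pvVals grid) :
    solveALoop grid (PySem.List.len grid) (PySem.List.len (PySem.List.pyGetD grid 0 []))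
        (ks.map (fun k => (k, ((pvVals grid).count k : Int))))
      = solveBLoop grid (ks.map (fun k => (k, pvPos grid k))) := by

  induction ks with
  | nil => rfl
  | cons k ks ih =>
    have hk : k ∈ pvVals grid := hks k List.mem_cons_self
    have hk0 : k ≠ 0 := by
      rw [pvVals, pvNz] at hk
      obtain ⟨t, ht, rfl⟩ := List.mem_map.mp hk
      have := List.of_mem_filter ht
      simpa using this
    rw [List.map_cons, List.map_cons, solveALoop, solveBLoop]
    simp only []
    rw [pv_positions_eq grid hPre k hk0]
    have hne : ¬ (pvPos grid k = []) := by
      intro h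
      have hc : 0 < (pvVals grid).count k := List.count_pos_iff.mpr hk
      rw [← pv_pos_length, h] at hc
      simp at hc
    rw [if_neg hne]
    set mr := PySem.List.minD ((pvPos grid k).map (·.1)) (fun x => x) 0 with hmr
    set Mr := PySem.List.maxD ((pvPos grid k).map (·.1)) (fun x => x) 0 with hMr
    set mc := PySem.List.minD ((pvPos grid k).map (·.2)) (fun x => x) 0 with hmc
    set Mc := PySem.List.maxD ((pvPos grid k).map (·.2)) (fun x => x) 0 with hMc
    have hcond : (Mr - mr + 1 ≤ 10 ∧ Mc - mc + 1 ≤ 10) ↔ (Mr - mr < 10 ∧ Mc - mc < 10) := by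
      omega
    by_cases hc : Mr - mr < 10 ∧ Mc - mc < 10
    · rw [if_pos (hcond.mpr hc), if_pos hc]
      simp only [PySem.List.foldl_append_singleton_eq_map, List.nil_append]
    · rw [if_neg (fun h => hc (hcond.mp h)), if_neg hc]
      exact ih (fun k' hk' => hks k' (List.mem_cons_of_mem _ hk'))

-- ===== VERDICT (by name: the statement is the Claim_ definition above) =====
theorem solve_1f85a75f_spec : Claim_equal_solve_1f85a75f := by
  intro grid _hDom hPre
  show solve_1f85a75f grid = solve_1f85a75f_alt grid
  rw [solve_1f85a75f, solve_1f85a75f_alt]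
  simp only []
  rw [pv_count_eq grid hPre, PySem.Dict.items_counter]
  have hkeys := pv_collect_keys grid hPre
  have hnodup : (solveBCollect grid (PySem.List.len grid)
      (PySem.List.len (PySem.List.pyGetD grid 0 []))).keys.Nodup := by
    rw [hkeys]; exact PySem.Set.nodup_ofList _
  rw [PySem.Dict.items_eq_map_keys _ hnodup [], hkeys]
  have hB : (PySem.Set.ofList (pvVals grid)).map (fun k =>
        (k, (solveBCollect grid (PySem.List.len grid)
              (PySem.List.len (PySem.List.pyGetD grid 0 []))).getD k []))
      = (PySem.Set.ofList (pvVals grid)).map (fun k => (k, pvPos grid k)) :=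
    List.map_congr_left (fun k _ => by rw [pv_collect_getD grid hPre])
  rw [hB]
  rw [pv_sorted_map (fun k => (k, ((pvVals grid).count k : Int))) (fun p => p.2)
        (fun k => (((pvVals grid).count k : Nat) : Int)) (fun a => rfl)]
  rw [pv_sorted_map (fun k => (k, pvPos grid k)) (fun kv => PySem.List.len kv.2)
        (fun k => (((pvVals grid).count k : Nat) : Int))
        (fun a => by simp only [PySem.List.len_eq, pv_pos_length])]
  rw [← List.map_reverse, ← List.map_reverse]
  apply pv_loop_eq grid hPre
  intro k hkmem
  have hkS : k ∈ PySem.Set.ofList (pvVals grid) := by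
    have hperm := PySem.List.sorted_perm (PySem.Set.ofList (pvVals grid))
      (fun k => (((pvVals grid).count k : Nat) : Int)) true
    exact hperm.mem_iff.mp (List.mem_reverse.mp hkmem)
  exact (PySem.Set.mem_ofList _ _).mp hkS
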